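-- pv_equiv track=rewrite | github.com/lumiqai/UOI-1806.01264 | demo.py | get_tags
-- ===== SOURCE A (Python) =====
-- def get_tags(tags):
--     filtered = []
--     for i in range(len(tags)):
--         if tags[i] == 0:
--             continue
--         if tags[i] % 2 == 1:
--             filtered.append({
--                 'begin': i,
--                 'end': i,
--                 'type': i,
--             })
--         elif i > 0 and tags[i - 1] == tags[i] - 1:
--             filtered[-1]['end'] += 1
--     return filtered
-- ===== SOURCE B (Python) =====
-- def get_tags(tags):
--     n = len(tags)
--     spans = []
--     for j, t in enumerate(tags):
--         if t % 2 == 1: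
--             if j + 1 < n and tags[j + 1] == t + 1 and tags[j + 1] != 0:
--                 end = j + 1
--             else:
--                 end = j
--             spans.append({'begin': j, 'end': end, 'type': j})
--     return spans
-- ===== Notes on version B (the rewrite author's own statement) =====
-- stated objective: simpler
-- what changed: B builds each span fully formed in one forward pass by looking ahead at the next tag when an odd tag starts a span, instead of A's append-then-mutate scheme that patches the last appended dict's 'end' on a later iteration.
import Mathlib
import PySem

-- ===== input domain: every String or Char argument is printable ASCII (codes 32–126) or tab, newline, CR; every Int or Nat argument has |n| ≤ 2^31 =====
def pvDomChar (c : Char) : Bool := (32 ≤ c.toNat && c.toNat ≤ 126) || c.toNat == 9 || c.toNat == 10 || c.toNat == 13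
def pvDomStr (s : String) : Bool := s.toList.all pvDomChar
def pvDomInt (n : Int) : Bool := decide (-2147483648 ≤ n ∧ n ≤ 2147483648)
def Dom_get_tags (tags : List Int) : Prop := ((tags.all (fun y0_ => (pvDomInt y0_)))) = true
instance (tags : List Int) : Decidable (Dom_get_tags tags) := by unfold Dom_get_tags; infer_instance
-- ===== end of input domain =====

-- B builds each span fully formed by looking ahead at tags[j+1], instead of A's append-then-mutate
-- scheme that patches the last appended dict's 'end' on a later iteration; objective: simpler.

-- ===== PORT A =====
-- A's mutation of the last span: increment the value stored under key "end" of the last dict.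
-- (Python would raise IndexError on an empty 'filtered'; that state is unreachable — proved
-- below via the loop invariant — so the [] case is a harmless placeholder.)
def pvIncEndLast : List (List (String × Int)) → List (List (String × Int))
  | [] => []
  | [d] => [d.map (fun kv => if kv.1 == "end" then (kv.1, kv.2 + 1) else kv)]
  | d :: rest => d :: pvIncEndLast rest

-- the loop body of A, one iteration: i is the index, filtered the accumulator
def pvStepA (tags : List Int) (filtered : List (List (String × Int))) (i : Nat) :
    List (List (String × Int)) :=
  let t := tags.getD i 0          -- tags[i], i ∈ range(len(tags)) so in range
  if t == 0 then filtered
  else if PySem.Int.mod t 2 == 1 then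
    filtered ++ [[("begin", (i : Int)), ("end", (i : Int)), ("type", (i : Int))]]
  else if decide (0 < i) && (tags.getD (i - 1) 0 == t - 1) then
    pvIncEndLast filtered
  else filtered

def get_tags (tags : List Int) : List (List (String × Int)) :=
  (List.range tags.length).foldl (pvStepA tags) []

-- ===== PORT B =====
-- one loop iteration of B: the span (if any) contributed by index j, look-ahead bounded by k
def pvSpanB (tags : List Int) (k : Nat) (j : Nat) : Option (List (String × Int)) :=
  let t := tags.getD j 0
  if PySem.Int.mod t 2 == 1 then
    some [("begin", (j : Int)),
          ("end", if decide (j + 1 < k) && (tags.getD (j + 1) 0 == t + 1)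
                     && (tags.getD (j + 1) 0 != 0)
                  then (j : Int) + 1 else (j : Int)),
          ("type", (j : Int))]
  else none

def get_tags_alt (tags : List Int) : List (List (String × Int)) :=
  (List.range tags.length).filterMap (pvSpanB tags tags.length)

-- ===== PRECONDITION & SPEC =====
def Spec_get_tags (tags : List Int) (out : List (List (String × Int))) : Prop := out = get_tags_alt tags
instance (tags : List Int) (out : List (List (String × Int))) : Decidable (Spec_get_tags tags out) := by unfold Spec_get_tags; infer_instance

-- ===== CLAIM (what is proved, stated in full; the proofs are below) =====
def Claim_equal_get_tags : Prop := ∀ (tags : List Int), Dom_get_tags tags → Spec_get_tags tags (get_tags tags)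

-- ===== LEMMAS AND PROOFS =====

-- B's output truncated to the first k indices, with the look-ahead also truncated at k:
-- exactly A's loop state after k iterations.
def pvAlt (tags : List Int) (k : Nat) : List (List (String × Int)) :=
  (List.range k).filterMap (pvSpanB tags k)

theorem pvAlt_len (tags : List Int) : pvAlt tags tags.length = get_tags_alt tags := rfl

-- Python's t % 2 on Int: value in {0,1}
theorem pvMod2 (t : Int) : PySem.Int.mod t 2 = 0 ∨ PySem.Int.mod t 2 = 1 := by
  have h1 := PySem.Int.mod_nonneg t (b := 2) (by norm_num)
  have h2 := PySem.Int.mod_lt t (b := 2) (by norm_num)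
  omega

theorem pvOdd_succ_even (t : Int) (h : PySem.Int.mod t 2 = 1) : PySem.Int.mod (t + 1) 2 = 0 := by
  have hd : (2 : Int) ∣ (t + 1) := by
    have := PySem.Int.floordiv_mul_add_mod t 2
    exact ⟨PySem.Int.floordiv t 2 + 1, by omega⟩
  exact (PySem.Int.mod_eq_zero_iff_dvd (t + 1) 2).mpr hd

theorem pvEven_pred_odd (t : Int) (h : PySem.Int.mod t 2 = 0) : PySem.Int.mod (t - 1) 2 = 1 := by
  rcases pvMod2 (t - 1) with h0 | h1
  · exfalso
    have hd1 := (PySem.Int.mod_eq_zero_iff_dvd (t - 1) 2).mp h0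
    have hd2 := (PySem.Int.mod_eq_zero_iff_dvd t 2).mp h
    omega
  · exact h1

theorem pvIncEndLast_append (L : List (List (String × Int))) (d : List (String × Int)) :
    pvIncEndLast (L ++ [d]) =
      L ++ [d.map (fun kv => if kv.1 == "end" then (kv.1, kv.2 + 1) else kv)] := by
  induction L with
  | nil => rfl
  | cons x xs ih =>
    cases xs with
    | nil => simp [pvIncEndLast]
    | cons y ys => simpa [pvIncEndLast] using ih

-- enlarging the look-ahead bound does not change a span whose look-ahead stays inside it
theorem pvSpanB_bound (tags : List Int) (k j : Nat) (hj : j + 1 < k) :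
    pvSpanB tags (k + 1) j = pvSpanB tags k j := by
  simp only [pvSpanB, decide_eq_true hj, decide_eq_true (Nat.lt_succ_of_lt hj)]

-- the span contributed by the newest index k never uses its (out-of-bound) look-ahead
theorem pvSpanB_self (tags : List Int) (k : Nat) :
    pvSpanB tags (k + 1) k =
      if PySem.Int.mod (tags.getD k 0) 2 == 1 then
        some [("begin", (k : Int)), ("end", (k : Int)), ("type", (k : Int))]
      else none := by
  simp only [pvSpanB, decide_eq_false (Nat.lt_irrefl (k + 1)), Bool.false_and, Bool.false_eq_true,
    if_false]

-- bound k → k+1 changes nothing for j < k unless the look-ahead of j = k-1 becomes newly enabled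
theorem pvSpanB_eq_of_not_enabled (tags : List Int) (k j : Nat) (hjk : j < k)
    (hne : j + 1 = k → ¬(tags.getD k 0 = tags.getD j 0 + 1 ∧ tags.getD k 0 ≠ 0 ∧
            PySem.Int.mod (tags.getD j 0) 2 = 1)) :
    pvSpanB tags (k + 1) j = pvSpanB tags k j := by
  by_cases hj : j + 1 < k
  · exact pvSpanB_bound tags k j hj
  · have hk : j + 1 = k := by omega
    by_cases hodd : (PySem.Int.mod (tags.getD j 0) 2 == 1) = true
    · have hAB : ((tags.getD (j + 1) 0 == tags.getD j 0 + 1) &&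
          (tags.getD (j + 1) 0 != 0)) = false := by
        cases hA : (tags.getD (j + 1) 0 == tags.getD j 0 + 1) with
        | false => rfl
        | true =>
          cases hB : (tags.getD (j + 1) 0 != 0) with
          | false => rfl
          | true =>
            exfalso
            apply hne hk
            refine ⟨?_, ?_, by simpa using hodd⟩
            · rw [← hk]; exact beq_iff_eq.mp hA
            · rw [← hk]; exact bne_iff_ne.mp hB
      simp only [pvSpanB]
      rw [if_pos hodd, if_pos hodd, Bool.and_assoc, Bool.and_assoc, hAB,
        Bool.and_false, Bool.and_false]
    · simp only [pvSpanB]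
      rw [if_neg hodd, if_neg hodd]

-- adding index k when the look-ahead of k-1 is not newly enabled: just append index k's span
theorem pvAlt_succ_no (tags : List Int) (k : Nat)
    (hne : ∀ j, j + 1 = k → ¬(tags.getD k 0 = tags.getD j 0 + 1 ∧ tags.getD k 0 ≠ 0 ∧
            PySem.Int.mod (tags.getD j 0) 2 = 1)) :
    pvAlt tags (k + 1) = pvAlt tags k ++ (pvSpanB tags (k + 1) k).toList := by
  unfold pvAlt
  rw [List.range_succ, List.filterMap_append]
  congr 1
  exact List.filterMap_congr (fun j hj =>
    pvSpanB_eq_of_not_enabled tags k j (List.mem_range.mp hj) (hne j))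

-- adding index k'+1 when it extends the span opened at k': patch that last span's end
theorem pvAlt_succ_yes (tags : List Int) (k' : Nat)
    (hpo : PySem.Int.mod (tags.getD k' 0) 2 = 1)
    (hpred : tags.getD (k' + 1) 0 = tags.getD k' 0 + 1)
    (hnz : tags.getD (k' + 1) 0 ≠ 0) :
    pvAlt tags (k' + 1 + 1) = pvIncEndLast (pvAlt tags (k' + 1)) := by
  have hpoB : (PySem.Int.mod (tags.getD k' 0) 2 == 1) = true := by simpa using hpo
  have heven : PySem.Int.mod (tags.getD (k' + 1) 0) 2 = 0 := by
    rw [hpred]; exact pvOdd_succ_even _ hpo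
  have hself : pvSpanB tags (k' + 1) k' =
      some [("begin", (k' : Int)), ("end", (k' : Int)), ("type", (k' : Int))] := by
    rw [pvSpanB_self, if_pos hpoB]
  have hone : pvAlt tags (k' + 1) =
      (List.range k').filterMap (pvSpanB tags (k' + 1)) ++
        [[("begin", (k' : Int)), ("end", (k' : Int)), ("type", (k' : Int))]] := by
    unfold pvAlt
    rw [List.range_succ, List.filterMap_append]
    simp [hself]
  have htwo : pvAlt tags (k' + 1 + 1) =
      (List.range k').filterMap (pvSpanB tags (k' + 1)) ++
        [[("begin", (k' : Int)), ("end", (k' : Int) + 1), ("type", (k' : Int))]] := by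
    unfold pvAlt
    rw [List.range_succ, List.range_succ, List.filterMap_append, List.filterMap_append,
      List.append_assoc]
    congr 1
    · exact List.filterMap_congr (fun j hj =>
        pvSpanB_bound tags (k' + 1) j (by have := List.mem_range.mp hj; omega))
    · have hA : (tags.getD (k' + 1) 0 == tags.getD k' 0 + 1) = true := beq_iff_eq.mpr hpred
      have hB : (tags.getD (k' + 1) 0 != 0) = true := bne_iff_ne.mpr hnz
      have hsk : pvSpanB tags (k' + 1 + 1) k' =
          some [("begin", (k' : Int)), ("end", (k' : Int) + 1), ("type", (k' : Int))] := by
        simp only [pvSpanB]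
        rw [if_pos hpoB, decide_eq_true (by omega : k' + 1 < k' + 1 + 1), hA, hB]
        rfl
      have hsk1 : pvSpanB tags (k' + 1 + 1) (k' + 1) = none := by
        rw [pvSpanB_self]
        have hf : (PySem.Int.mod (tags.getD (k' + 1) 0) 2 == 1) = false := by
          rw [heven]; rfl
        rw [hf]; rfl
      simp [hsk, hsk1]
  rw [hone, htwo, pvIncEndLast_append]
  simp

theorem pvAlt_invariant (tags : List Int) (k : Nat) :
    (List.range k).foldl (pvStepA tags) [] = pvAlt tags k := by
  induction k with
  | zero => rfl
  | succ k ih =>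
    rw [List.range_succ, List.foldl_append, ih, List.foldl_cons, List.foldl_nil]
    by_cases h0 : tags.getD k 0 = 0
    · -- tags[k] == 0: A skips; B adds no span (0 not odd) and no look-ahead is newly enabled
      have h0' : tags[k]?.getD 0 = 0 := by simpa using h0
      have hstep : pvStepA tags (pvAlt tags k) k = pvAlt tags k := by
        simp [pvStepA, h0']
      rw [hstep, pvAlt_succ_no tags k (by rintro j - ⟨-, hnz, -⟩; exact hnz h0)]
      have : pvSpanB tags (k + 1) k = none := by
        rw [pvSpanB_self, h0]; rfl
      simp [this]
    by_cases hodd : PySem.Int.mod (tags.getD k 0) 2 = 1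
    · -- odd tag: new singleton span; the look-ahead of k-1 cannot be newly enabled
      have hoddB : (PySem.Int.mod (tags.getD k 0) 2 == 1) = true := by simpa using hodd
      have h0' := h0
      have hodd' := hodd
      simp at h0' hodd'
      have hstep : pvStepA tags (pvAlt tags k) k =
          pvAlt tags k ++ [[("begin", (k : Int)), ("end", (k : Int)), ("type", (k : Int))]] := by
        simp [pvStepA, h0', hodd']
      rw [hstep, pvAlt_succ_no tags k ?_]
      · rw [pvSpanB_self, if_pos hoddB]; rfl
      · rintro j - ⟨he, -, hjo⟩
        have := pvOdd_succ_even _ hjo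
        rw [← he] at this
        omega
    -- tags[k] even and nonzero
    have hmod0 : PySem.Int.mod (tags.getD k 0) 2 = 0 := by
      rcases pvMod2 (tags.getD k 0) with h | h
      · exact h
      · exact absurd h hodd
    have hoddB : (PySem.Int.mod (tags.getD k 0) 2 == 1) = false := by simpa using hodd
    by_cases helif : 0 < k ∧ tags.getD (k - 1) 0 = tags.getD k 0 - 1
    · -- the elif fires: pvIncEndLast on A's side, newly enabled look-ahead on B's side
      obtain ⟨hkpos, hpred⟩ := helif
      obtain ⟨k', rfl⟩ : ∃ k', k = k' + 1 := ⟨k - 1, by omega⟩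
      have hkk : k' + 1 - 1 = k' := by omega
      rw [hkk] at hpred
      have h0' := h0
      have hodd' := hodd
      have hpred' := hpred
      simp at h0' hodd' hpred'
      have hstep : pvStepA tags (pvAlt tags (k' + 1)) (k' + 1) =
          pvIncEndLast (pvAlt tags (k' + 1)) := by
        simp [pvStepA, h0', hodd', hkk, hpred']
      rw [hstep]
      exact (pvAlt_succ_yes tags k'
        (by rw [hpred]; exact pvEven_pred_odd _ hmod0) (by omega) h0).symm
    · -- nothing happens on either side
      have h0' := h0
      have hodd' := hodd
      simp at h0' hodd'
      have hstep : pvStepA tags (pvAlt tags k) k = pvAlt tags k := by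
        by_cases hkpos : 0 < k
        · have hne' : ¬ tags[k - 1]?.getD 0 = tags[k]?.getD 0 - 1 := by
            intro h
            exact helif ⟨hkpos, by simpa using h⟩
          simp [pvStepA, h0', hodd', hne']
        · have hk0 : k = 0 := by omega
          subst hk0
          simp [pvStepA, h0', hodd']
      rw [hstep, pvAlt_succ_no tags k ?_]
      · have : pvSpanB tags (k + 1) k = none := by
          rw [pvSpanB_self, hoddB]; rfl
        simp [this]
      · rintro j hj ⟨he, -, -⟩
        subst hj
        apply helif
        have hidx : j + 1 - 1 = j := by omega
        rw [hidx]
        exact ⟨by omega, by omega⟩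

-- ===== VERDICT (by name: the statement is the Claim_ definition above) =====
theorem get_tags_spec : Claim_equal_get_tags := by
  intro tags _
  unfold Spec_get_tags get_tags
  rw [pvAlt_invariant tags tags.length, pvAlt_len]
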